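-- pv_equiv track=rewrite | github.com/jonathanvv1989/edx_mitx_icsp | ex/ch2_exercises.py | count_alph
-- ===== SOURCE A (Python) =====
-- def count_alph(s):
--     """
--     ch2 problem 3
--     counter the longest sub-string in alphabetical order
--     """
--     # draft logic think 1st case, first master etc..
--     master_str = ""
--     sub_str = ""
--     for i in range(len(s)):
--         next_gt = False
--         sub_str += s[i]
--         if i < (len(s)-1):
--             # is next letter alphabetically greater?
--             if (s[i+1] >= s[i]):
--                 next_gt = True
--         # end of consecutive string
--         if not next_gt:
--             if len(sub_str) > len(master_str):
--                 master_str = sub_str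
--             # reset sub string
--             sub_str = ""
--
--     return "Longest substring in alphabetical order is: " + master_str
-- ===== SOURCE B (Python) =====
-- def count_alph(s):
--     # Divide and conquer: solve(t) returns, for a nonempty chunk t,
--     #   (best, pre, suf) =
--     #   (leftmost longest alphabetically-nondecreasing run of t,
--     #    maximal nondecreasing prefix of t,
--     #    maximal nondecreasing suffix of t).
--     # Two halves combine via the run that bridges the split point.
--     def solve(t):
--         if len(t) == 1:
--             return t, t, t
--         m = len(t) // 2
--         l, r = t[:m], t[m:]
--         lb, lp, ls = solve(l)
--         rb, rp, rs = solve(r)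
--         joins = l[-1] <= r[0]
--         bridge = ls + rp if joins else ""
--         best = lb
--         if len(bridge) > len(best):
--             best = bridge
--         if len(rb) > len(best):
--             best = rb
--         pre = l + rp if len(lp) == len(l) and joins else lp
--         suf = ls + r if len(rs) == len(r) and joins else rs
--         return best, pre, suf
--     master = solve(s)[0] if s else ""
--     return "Longest substring in alphabetical order is: " + master
-- ===== Notes on version B (the rewrite author's own statement) =====
-- stated objective: alternative
-- what changed: B replaces A's left-to-right index loop (current run + best-so-far with a lookahead flag) by a divide-and-conquer recursion: split the string in half, recursively compute for each half its best run, maximal nondecreasing prefix and suffix, and combine the halves through the run bridging the split point.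
import Mathlib
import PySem

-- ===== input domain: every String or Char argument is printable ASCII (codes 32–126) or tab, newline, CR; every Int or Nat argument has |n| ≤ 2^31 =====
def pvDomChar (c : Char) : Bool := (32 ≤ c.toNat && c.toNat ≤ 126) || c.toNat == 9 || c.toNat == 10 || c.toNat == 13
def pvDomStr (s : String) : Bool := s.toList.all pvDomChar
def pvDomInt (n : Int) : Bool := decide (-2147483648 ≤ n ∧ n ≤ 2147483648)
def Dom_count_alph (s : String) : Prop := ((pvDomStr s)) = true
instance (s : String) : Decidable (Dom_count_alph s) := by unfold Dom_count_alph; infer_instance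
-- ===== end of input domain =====

-- B recomputes the same answer by divide and conquer (split in half, combine via the run bridging the split) instead of A's left-to-right scan; alternative decomposition, not claimed faster.


-- ===== PORT A =====
-- loop body of A, named so the proofs can speak about it
def pvStepA (cs : List Char) (st : List Char × List Char) (i : Int) : List Char × List Char :=
  let master_str := st.1
  let sub_str := st.2
  let next_gt := false
  let sub_str := sub_str ++ [PySem.List.pyGetD cs i ' ']
  let next_gt := if i < (cs.length : Int) - 1 then
      (if PySem.List.pyGetD cs (i+1) ' ' ≥ PySem.List.pyGetD cs i ' ' then true else next_gt)
    else next_gt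
  if !next_gt then
    (if sub_str.length > master_str.length then sub_str else master_str, [])
  else
    (master_str, sub_str)

def count_alph (s : String) : String :=
  let cs := s.toList
  let res := (PySem.List.pyRange 0 (cs.length : Int) 1).foldl (pvStepA cs) ([], [])
  "Longest substring in alphabetical order is: " ++ String.ofList res.1

-- ===== PORT B =====
-- solve(t) of Source B: for a nonempty chunk t returns (best, pre, suf); recursion on the two halves
def pvSolveB (t : List Char) : List Char × List Char × List Char :=
  if _h1 : t.length = 1 then (t, t, t)
  else if _h0 : t = [] then (t, t, t)   -- unreachable guard for totality: Python's solve only ever sees nonempty chunks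
  else
    let m : Int := PySem.Int.floordiv (t.length : Int) 2      -- len(t) // 2
    let l := PySem.List.slice t none (some m)                 -- t[:m]
    let r := PySem.List.slice t (some m) none                 -- t[m:]
    let L := pvSolveB l
    let R := pvSolveB r
    let lb := L.1; let lp := L.2.1; let ls := L.2.2
    let rb := R.1; let rp := R.2.1; let rs := R.2.2
    let joins := PySem.List.pyGetD l (-1) ' ' ≤ PySem.List.pyGetD r 0 ' '   -- l[-1] <= r[0]
    let bridge := if joins then ls ++ rp else []
    let best := lb
    let best := if bridge.length > best.length then bridge else best
    let best := if rb.length > best.length then rb else best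
    let pre := if lp.length = l.length ∧ joins then l ++ rp else lp
    let suf := if rs.length = r.length ∧ joins then ls ++ r else rs
    (best, pre, suf)
termination_by t.length
decreasing_by
  · have hm : PySem.Int.floordiv ((t.length : Nat) : Int) 2 = ((t.length / 2 : Nat) : Int) := by
      exact_mod_cast PySem.Int.floordiv_natCast t.length 2
    have hlen : 2 ≤ t.length := by
      have h0' : t.length ≠ 0 := by simpa [List.length_eq_zero_iff] using _h0
      omega
    simp only [hm, PySem.List.slice_to_natCast, List.length_take]
    omega
  · have hm : PySem.Int.floordiv ((t.length : Nat) : Int) 2 = ((t.length / 2 : Nat) : Int) := by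
      exact_mod_cast PySem.Int.floordiv_natCast t.length 2
    have hlen : 2 ≤ t.length := by
      have h0' : t.length ≠ 0 := by simpa [List.length_eq_zero_iff] using _h0
      omega
    simp only [hm, PySem.List.slice_from_natCast, List.length_drop]
    omega

def count_alph_alt (s : String) : String :=
  let cs := s.toList
  let master := if cs ≠ [] then (pvSolveB cs).1 else []
  "Longest substring in alphabetical order is: " ++ String.ofList master

-- ===== PRECONDITION & SPEC =====
def Spec_count_alph (s : String) (out : String) : Prop := out = count_alph_alt s
instance (s : String) (out : String) : Decidable (Spec_count_alph s out) := by unfold Spec_count_alph; infer_instance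

-- ===== CLAIM (what is proved, stated in full; the proofs are below) =====
def Claim_equal_count_alph : Prop := ∀ (s : String), Dom_count_alph s → Spec_count_alph s (count_alph s)

-- ===== LEMMAS AND PROOFS =====

-- "keep the longer, first on ties" selector shared by both programs
def pvSel (m x : List Char) : List Char := if x.length > m.length then x else m

-- structural reformulation of A's index loop
def pvLoopA (cs sub master : List Char) : List Char :=
  match cs with
  | [] => master
  | c :: rest =>
    match rest with
    | [] => pvSel master (sub ++ [c])
    | d :: _ => if d ≥ c then pvLoopA rest (sub ++ [c]) master
                else pvLoopA rest [] (pvSel master (sub ++ [c]))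

-- one maximal nondecreasing run and the remainder
def pvRun1 (c : Char) (cs : List Char) : List Char × List Char :=
  match cs with
  | [] => ([c], [])
  | d :: ds => if d ≥ c then
      let pr := pvRun1 d ds
      (c :: pr.1, pr.2)
    else ([c], d :: ds)

theorem pvRun1_snd_le (c : Char) (cs : List Char) : (pvRun1 c cs).2.length ≤ cs.length := by
  induction cs generalizing c with
  | nil => simp [pvRun1]
  | cons d ds ih =>
    simp only [pvRun1]
    split
    · exact le_trans (ih d) (Nat.le_succ _)
    · simp

-- the list of maximal nondecreasing runs
def pvRuns (cs : List Char) : List (List Char) :=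
  match cs with
  | [] => []
  | c :: rest =>
    let pr := pvRun1 c rest
    pr.1 :: pvRuns pr.2
termination_by cs.length
decreasing_by
  exact Nat.lt_succ_of_le (pvRun1_snd_le c rest)


-- ---- A-side machinery (A's fold over indices = fold of "keep longer" over the maximal runs) ----

theorem pvRun1_fst_cons (c : Char) (cs : List Char) :
    (pvRun1 c cs).1 = c :: (pvRun1 c cs).1.tail := by
  match cs with
  | [] => simp [pvRun1]
  | d :: ds =>
    simp only [pvRun1]
    split <;> simp

theorem pvBridgeA (cs : List Char) : ∀ (k i : Nat), cs.length = i + k → ∀ sub master,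
    ((PySem.List.pyRange (i : Int) (cs.length : Int) 1).foldl (pvStepA cs) (master, sub)).1
      = pvLoopA (cs.drop i) sub master := by
  intro k
  induction k with
  | zero =>
    intro i h sub master
    rw [PySem.List.pyRange_one_eq_nil (by omega)]
    rw [List.drop_of_length_le (by omega)]
    simp [pvLoopA]
  | succ k ih =>
    intro i h sub master
    have hi : i < cs.length := by omega
    rw [PySem.List.pyRange_one_cons (by exact_mod_cast hi)]
    have hcast : ((i : Int) + 1) = ((i + 1 : Nat) : Int) := by push_cast; ring
    rw [List.foldl_cons, hcast]
    have hdrop : cs.drop i = cs[i] :: cs.drop (i + 1) := List.drop_eq_getElem_cons hi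
    have hget : PySem.List.pyGetD cs (i : Int) ' ' = cs[i] :=
      PySem.List.pyGetD_ofNat cs i ' ' hi
    by_cases h1 : i + 1 < cs.length
    · have hget1 : PySem.List.pyGetD cs ((i + 1 : Nat) : Int) ' ' = cs[i+1] :=
        PySem.List.pyGetD_ofNat cs (i+1) ' ' h1
      have hdrop1 : cs.drop (i + 1) = cs[i+1] :: cs.drop (i + 2) := List.drop_eq_getElem_cons h1
      have hlt : ((i : Int)) < (cs.length : Int) - 1 := by exact_mod_cast (by omega : (i:Int) < (cs.length:Int) - 1)
      by_cases hge : cs[i+1] ≥ cs[i]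
      · have : pvStepA cs (master, sub) (i : Int) = (master, sub ++ [cs[i]]) := by
          simp only [pvStepA, hcast, hget, hget1, if_pos hlt, if_pos hge]
          simp
        rw [this, ih (i+1) (by omega)]
        rw [hdrop, hdrop1, pvLoopA, if_pos hge, ← hdrop1]
      · have : pvStepA cs (master, sub) (i : Int) = (pvSel master (sub ++ [cs[i]]), []) := by
          simp only [pvStepA, hcast, hget, hget1, if_pos hlt, if_neg hge]
          simp [pvSel]
        rw [this, ih (i+1) (by omega)]
        rw [hdrop, hdrop1, pvLoopA, if_neg hge, ← hdrop1]
    · have hlt : ¬ ((i : Int)) < (cs.length : Int) - 1 := by omega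
      have : pvStepA cs (master, sub) (i : Int) = (pvSel master (sub ++ [cs[i]]), []) := by
        simp only [pvStepA, hget, if_neg hlt]
        simp [pvSel]
      rw [this, ih (i+1) (by omega)]
      have hdrop1 : cs.drop (i + 1) = [] := List.drop_of_length_le (by omega)
      rw [hdrop, hdrop1, pvLoopA]
      simp [pvLoopA]

theorem pvLoopA_run1 : ∀ (cs : List Char) (c : Char) (sub master : List Char),
    pvLoopA (c :: cs) sub master
      = pvLoopA (pvRun1 c cs).2 [] (pvSel master (sub ++ (pvRun1 c cs).1)) := by
  intro cs
  induction cs with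
  | nil => intro c sub master; simp [pvLoopA, pvRun1]
  | cons d ds ih =>
    intro c sub master
    by_cases hge : d ≥ c
    · rw [pvLoopA, if_pos hge, ih d (sub ++ [c]) master]
      simp [pvRun1, hge]
    · rw [pvLoopA, if_neg hge]
      simp [pvRun1, hge, pvLoopA]

theorem pvLoopA_runs : ∀ (n : Nat) (cs : List Char), cs.length ≤ n → ∀ master,
    pvLoopA cs [] master = (pvRuns cs).foldl pvSel master := by
  intro n
  induction n with
  | zero =>
    intro cs h master
    have : cs = [] := List.eq_nil_of_length_eq_zero (by omega)
    simp [this, pvLoopA, pvRuns]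
  | succ n ih =>
    intro cs h master
    match cs with
    | [] => simp [pvLoopA, pvRuns]
    | c :: rest =>
      rw [pvLoopA_run1, pvRuns]
      simp only [List.foldl_cons]
      exact ih _ (by have := pvRun1_snd_le c rest; simp at h ⊢; omega) _

-- ---- generic headI / getLastI helpers ----

theorem pvGetLastI_eq_getLast {α : Type} [Inhabited α] (l : List α) (h : l ≠ []) :
    l.getLastI = l.getLast h := by
  rw [List.getLastI_eq_getLast?_getD, List.getLast?_eq_some_getLast h]
  rfl

theorem pvDropLast_append_getLastI {α : Type} [Inhabited α] (l : List α) (h : l ≠ []) :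
    l.dropLast ++ [l.getLastI] = l := by
  rw [pvGetLastI_eq_getLast l h]; exact List.dropLast_append_getLast h

theorem pvGetLastI_append {α : Type} [Inhabited α] (l r : List α) (h : r ≠ []) :
    (l ++ r).getLastI = r.getLastI := by
  rw [List.getLastI_eq_getLast?_getD, List.getLastI_eq_getLast?_getD, List.getLast?_append,
    List.getLast?_eq_some_getLast h]
  rfl

theorem pvGetLastI_cons {α : Type} [Inhabited α] (a : α) (l : List α) (h : l ≠ []) :
    (a :: l).getLastI = l.getLastI :=
  pvGetLastI_append [a] l h

theorem pvHeadI_append {α : Type} [Inhabited α] (l r : List α) (h : l ≠ []) :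
    (l ++ r).headI = l.headI := by
  cases l with
  | nil => exact absurd rfl h
  | cons a l => rfl

theorem pvHeadI_cons_tail {α : Type} [Inhabited α] (l : List α) (h : l ≠ []) :
    l.headI :: l.tail = l := by
  cases l with
  | nil => exact absurd rfl h
  | cons a l => rfl

theorem pvGetLastI_mem {α : Type} [Inhabited α] (l : List α) (h : l ≠ []) : l.getLastI ∈ l := by
  rw [pvGetLastI_eq_getLast l h]; exact List.getLast_mem h

theorem pvLe_length_flatten {α : Type} (rs : List (List α)) (x : List α) (hx : x ∈ rs) :
    x.length ≤ rs.flatten.length := by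
  induction rs with
  | nil => simp at hx
  | cons y ys ih =>
    rcases List.mem_cons.mp hx with h | h
    · subst h; simp
    · have := ih h; simp only [List.flatten_cons, List.length_append]; omega

-- ---- the "keep the longer, first on ties" fold ----

theorem pvSel_length (a x : List Char) : a.length ≤ (pvSel a x).length := by
  unfold pvSel; split <;> omega

theorem pvFoldl_sel_length (rs : List (List Char)) : ∀ a : List Char,
    a.length ≤ (rs.foldl pvSel a).length := by
  induction rs with
  | nil => simp
  | cons x xs ih => intro a; exact le_trans (pvSel_length a x) (ih _)

theorem pvFoldl_sel_ge (rs : List (List Char)) : ∀ a h : List Char, h.length ≤ a.length →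
    rs.foldl pvSel a = if (rs.foldl pvSel h).length > a.length then rs.foldl pvSel h else a := by
  induction rs with
  | nil => intro a h hle; simp only [List.foldl_nil]; rw [if_neg (by omega)]
  | cons x xs ih =>
    intro a h hle
    simp only [List.foldl_cons]
    by_cases hx : x.length > a.length
    · have hx2 : x.length > h.length := by omega
      rw [show pvSel a x = x by unfold pvSel; rw [if_pos hx],
          show pvSel h x = x by unfold pvSel; rw [if_pos hx2]]
      have := pvFoldl_sel_length xs x
      rw [if_pos (by omega)]
    · rw [show pvSel a x = a by unfold pvSel; rw [if_neg hx]]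
      by_cases hxh : x.length > h.length
      · rw [show pvSel h x = x by unfold pvSel; rw [if_pos hxh]]
        exact ih a x (by omega)
      · rw [show pvSel h x = h by unfold pvSel; rw [if_neg hxh]]
        exact ih a h hle

theorem pvFoldl_sel_cons (rs : List (List Char)) (a h : List Char) :
    (h :: rs).foldl pvSel a
      = if (rs.foldl pvSel h).length > a.length then rs.foldl pvSel h else a := by
  simp only [List.foldl_cons]
  by_cases hx : h.length > a.length
  · rw [show pvSel a h = h by unfold pvSel; rw [if_pos hx]]
    have := pvFoldl_sel_length rs h
    rw [if_pos (by omega)]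
  · rw [show pvSel a h = a by unfold pvSel; rw [if_neg hx]]
    exact pvFoldl_sel_ge rs a h (by omega)

-- ---- structure of pvRuns: it is THE decomposition into maximal nondecreasing runs ----

-- boundary between consecutive runs: the next run starts strictly below the previous run's end
def pvBrk (a b : List Char) : Prop := b.headI < a.getLastI

theorem pvRun1_flat (c : Char) (cs : List Char) :
    (pvRun1 c cs).1 ++ (pvRun1 c cs).2 = c :: cs := by
  induction cs generalizing c with
  | nil => simp [pvRun1]
  | cons d ds ih =>
    simp only [pvRun1]
    split
    · simpa using ih d
    · simp

theorem pvRun1_chain (c : Char) (cs : List Char) :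
    List.IsChain (· ≤ ·) (pvRun1 c cs).1 := by
  induction cs generalizing c with
  | nil => simp [pvRun1]
  | cons d ds ih =>
    simp only [pvRun1]
    split
    · rename_i hge
      rw [List.isChain_cons]
      refine ⟨?_, ih d⟩
      intro y hy
      rw [pvRun1_fst_cons d ds] at hy
      simp at hy
      subst hy
      exact hge
    · simp

theorem pvRun1_brk (c : Char) (cs : List Char) (d : Char) (ds : List Char)
    (h : (pvRun1 c cs).2 = d :: ds) : d < (pvRun1 c cs).1.getLastI := by
  induction cs generalizing c with
  | nil => simp [pvRun1] at h
  | cons e es ih =>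
    by_cases hge : e ≥ c
    · simp only [pvRun1, if_pos hge] at h ⊢
      have hrec := ih e h
      rw [pvGetLastI_cons c _ (by rw [pvRun1_fst_cons]; simp)]
      exact hrec
    · simp only [pvRun1, if_neg hge] at h ⊢
      cases h
      simpa [List.getLastI] using lt_of_not_ge hge

theorem pvRuns_flatten (t : List Char) : (pvRuns t).flatten = t := by
  induction t using pvRuns.induct with
  | case1 => simp [pvRuns]
  | case2 c rest pr ih =>
    rw [pvRuns]
    simp only [List.flatten_cons]
    rw [ih]
    exact pvRun1_flat c rest

theorem pvRuns_mem (t : List Char) : ∀ x ∈ pvRuns t, x ≠ [] ∧ List.IsChain (· ≤ ·) x := by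
  induction t using pvRuns.induct with
  | case1 => simp [pvRuns]
  | case2 c rest pr ih =>
    rw [pvRuns]
    intro x hx
    rcases List.mem_cons.mp hx with h | h
    · subst h
      exact ⟨by rw [pvRun1_fst_cons]; simp, pvRun1_chain c rest⟩
    · exact ih x h

theorem pvRuns_chain (t : List Char) : List.IsChain pvBrk (pvRuns t) := by
  induction t using pvRuns.induct with
  | case1 => simp [pvRuns]
  | case2 c rest pr ih =>
    rw [pvRuns]
    rw [List.isChain_cons]
    refine ⟨?_, ih⟩
    intro y hy
    match hp : (pvRun1 c rest).2 with
    | [] => rw [hp] at hy; simp [pvRuns] at hy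
    | d :: ds =>
      rw [hp] at hy
      rw [pvRuns] at hy
      simp at hy
      subst hy
      unfold pvBrk
      rw [show ((pvRun1 d ds).1).headI = d by rw [pvRun1_fst_cons]; rfl]
      exact pvRun1_brk c rest d ds hp

theorem pvRuns_ne_nil (t : List Char) (h : t ≠ []) : pvRuns t ≠ [] := by
  cases t with
  | nil => exact absurd rfl h
  | cons c rest => rw [pvRuns]; simp

theorem pvRuns_headI_headI (t : List Char) (h : t ≠ []) : (pvRuns t).headI.headI = t.headI := by
  cases t with
  | nil => exact absurd rfl h
  | cons c rest =>
    rw [pvRuns]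
    show ((pvRun1 c rest).1).headI = c
    rw [pvRun1_fst_cons]; rfl

theorem pvFlatten_ne_nil (rs : List (List Char)) (h1 : ∀ x ∈ rs, x ≠ []) (h : rs ≠ []) :
    rs.flatten ≠ [] := by
  cases rs with
  | nil => exact absurd rfl h
  | cons y ys =>
    have hy := h1 y (List.mem_cons_self)
    cases y with
    | nil => exact absurd rfl hy
    | cons a as => simp

theorem pvGetLastI_flatten (rs : List (List Char)) (h1 : ∀ x ∈ rs, x ≠ []) (h : rs ≠ []) :
    rs.flatten.getLastI = rs.getLastI.getLastI := by
  induction rs with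
  | nil => exact absurd rfl h
  | cons y ys ih =>
    cases hys : ys with
    | nil => simp [List.getLastI]
    | cons z zs =>
      rw [← hys]
      have hys' : ys ≠ [] := by rw [hys]; simp
      simp only [List.flatten_cons]
      rw [pvGetLastI_append y ys.flatten
            (pvFlatten_ne_nil ys (fun x hx => h1 x (List.mem_cons_of_mem _ hx)) hys'),
          pvGetLastI_cons y ys hys']
      exact ih (fun x hx => h1 x (List.mem_cons_of_mem _ hx)) hys'

theorem pvRuns_getLastI (t : List Char) (h : t ≠ []) :
    (pvRuns t).getLastI.getLastI = t.getLastI := by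
  have := pvGetLastI_flatten (pvRuns t) (fun x hx => (pvRuns_mem t x hx).1) (pvRuns_ne_nil t h)
  rw [pvRuns_flatten] at this
  exact this.symm

theorem pvRun1_exact : ∀ (r rest : List Char), r ≠ [] → List.IsChain (· ≤ ·) r →
    (∀ d ds, rest = d :: ds → d < r.getLastI) →
    pvRun1 r.headI (r.tail ++ rest) = (r, rest) := by
  intro r
  induction r with
  | nil => intro rest hr; exact absurd rfl hr
  | cons c r' ih =>
    intro rest _ hch hb
    cases r' with
    | nil =>
      simp only [List.headI, List.tail_cons, List.nil_append]
      cases rest with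
      | nil => simp [pvRun1]
      | cons d ds =>
        have hd := hb d ds rfl
        simp [List.getLastI] at hd
        simp [pvRun1, not_le.mpr hd]
    | cons c2 r'' =>
      rw [List.isChain_cons_cons] at hch
      simp only [List.headI, List.tail_cons, List.cons_append]
      show pvRun1 c (c2 :: (r'' ++ rest)) = (c :: c2 :: r'', rest)
      rw [show pvRun1 c (c2 :: (r'' ++ rest))
            = if c2 ≥ c then ((c :: (pvRun1 c2 (r'' ++ rest)).1, (pvRun1 c2 (r'' ++ rest)).2))
              else ([c], c2 :: (r'' ++ rest)) from rfl]
      rw [if_pos hch.1]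
      have hbt : ∀ d ds, rest = d :: ds → d < (c2 :: r'').getLastI := by
        intro d ds hrest
        have := hb d ds hrest
        rwa [pvGetLastI_cons c (c2 :: r'') (by simp)] at this
      have := ih rest (by simp) hch.2 hbt
      simp only [List.headI, List.tail_cons] at this
      rw [this]

theorem pvRuns_eq : ∀ (rs : List (List Char)), (∀ x ∈ rs, x ≠ []) →
    (∀ x ∈ rs, List.IsChain (· ≤ ·) x) → List.IsChain pvBrk rs →
    pvRuns rs.flatten = rs := by
  intro rs
  induction rs with
  | nil => intro _ _ _; simp [pvRuns]
  | cons r rs' ih =>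
    intro h1 h2 h3
    have hr : r ≠ [] := h1 r List.mem_cons_self
    obtain ⟨c, r', rfl⟩ := List.exists_cons_of_ne_nil hr
    simp only [List.flatten_cons, List.cons_append]
    rw [pvRuns]
    have hb : ∀ d ds, rs'.flatten = d :: ds → d < (c :: r').getLastI := by
      intro d ds hfd
      cases hrs' : rs' with
      | nil => rw [hrs'] at hfd; simp at hfd
      | cons y ys =>
        rw [List.isChain_cons] at h3
        have hy : y ≠ [] := h1 y (by rw [hrs']; exact List.mem_cons_of_mem _ List.mem_cons_self)
        have hbrk : pvBrk (c :: r') y := by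
          apply h3.1
          rw [hrs']
          simp
        rw [hrs'] at hfd
        simp only [List.flatten_cons] at hfd
        obtain ⟨a, as, rfl⟩ := List.exists_cons_of_ne_nil hy
        simp at hfd
        unfold pvBrk at hbrk
        rw [← hfd.1]
        exact hbrk
    have hx := pvRun1_exact (c :: r') rs'.flatten (by simp)
        (h2 _ List.mem_cons_self) hb
    simp only [List.headI, List.tail_cons] at hx
    rw [hx]
    congr 1
    exact ih (fun x hx => h1 x (List.mem_cons_of_mem _ hx))
      (fun x hx => h2 x (List.mem_cons_of_mem _ hx))
      ((List.isChain_cons.mp h3).2)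

-- runs of a concatenation when the halves do NOT join at the boundary
theorem pvRuns_append_sep (l r : List Char) (hl : l ≠ []) (hr : r ≠ [])
    (h : ¬ l.getLastI ≤ r.headI) :
    pvRuns (l ++ r) = pvRuns l ++ pvRuns r := by
  have key := pvRuns_eq (pvRuns l ++ pvRuns r) ?h1 ?h2 ?h3
  case h1 =>
    intro x hx
    rcases List.mem_append.mp hx with h' | h'
    · exact (pvRuns_mem l x h').1
    · exact (pvRuns_mem r x h').1
  case h2 =>
    intro x hx
    rcases List.mem_append.mp hx with h' | h'
    · exact (pvRuns_mem l x h').2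
    · exact (pvRuns_mem r x h').2
  case h3 =>
    rw [List.isChain_append]
    refine ⟨pvRuns_chain l, pvRuns_chain r, ?_⟩
    intro x hx y hy
    have hx' : x = (pvRuns l).getLastI := by
      rw [pvGetLastI_eq_getLast _ (pvRuns_ne_nil l hl),
        ← Option.some_inj, ← List.getLast?_eq_some_getLast (pvRuns_ne_nil l hl), hx]
    have hy' : y = (pvRuns r).headI := by
      cases hR : pvRuns r with
      | nil => rw [hR] at hy; simp at hy
      | cons z zs => rw [hR] at hy; simp at hy; simp [← hy]
    subst hx'; subst hy'
    unfold pvBrk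
    rw [pvRuns_headI_headI r hr, pvRuns_getLastI l hl]
    exact lt_of_not_ge h
  rw [List.flatten_append, pvRuns_flatten, pvRuns_flatten] at key
  exact key

-- runs of a concatenation when the halves join: the boundary runs merge into one
theorem pvRuns_append_join (l r : List Char) (hl : l ≠ []) (hr : r ≠ [])
    (h : l.getLastI ≤ r.headI) :
    pvRuns (l ++ r)
      = (pvRuns l).dropLast ++ ((pvRuns l).getLastI ++ (pvRuns r).headI) :: (pvRuns r).tail := by
  have hLne := pvRuns_ne_nil l hl
  have hRne := pvRuns_ne_nil r hr
  have hLsplit := pvDropLast_append_getLastI (pvRuns l) hLne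
  have hRsplit := pvHeadI_cons_tail (pvRuns r) hRne
  have hlastL : (pvRuns l).getLastI ∈ pvRuns l := pvGetLastI_mem _ hLne
  have hheadR : (pvRuns r).headI ∈ pvRuns r := by rw [← hRsplit]; exact List.mem_cons_self
  have hlastLne : (pvRuns l).getLastI ≠ [] := (pvRuns_mem l _ hlastL).1
  have hheadRne : (pvRuns r).headI ≠ [] := (pvRuns_mem r _ hheadR).1
  have key := pvRuns_eq
      ((pvRuns l).dropLast ++ ((pvRuns l).getLastI ++ (pvRuns r).headI) :: (pvRuns r).tail)
      ?h1 ?h2 ?h3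
  case h1 =>
    intro x hx
    rcases List.mem_append.mp hx with h' | h'
    · exact (pvRuns_mem l x (List.dropLast_subset _ h')).1
    · rcases List.mem_cons.mp h' with h'' | h''
      · subst h''; simp [hlastLne]
      · exact (pvRuns_mem r x (List.tail_subset _ h'')).1
  case h2 =>
    intro x hx
    rcases List.mem_append.mp hx with h' | h'
    · exact (pvRuns_mem l x (List.dropLast_subset _ h')).2
    · rcases List.mem_cons.mp h' with h'' | h''
      · subst h''
        rw [List.isChain_append]
        refine ⟨(pvRuns_mem l _ hlastL).2, (pvRuns_mem r _ hheadR).2, ?_⟩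
        intro a ha b hb
        have ha' : a = l.getLastI := by
          rw [← pvRuns_getLastI l hl,
            pvGetLastI_eq_getLast _ hlastLne, ← Option.some_inj,
            ← List.getLast?_eq_some_getLast hlastLne, ha]
        have hb' : b = r.headI := by
          rw [← pvRuns_headI_headI r hr]
          cases hc : (pvRuns r).headI with
          | nil => exact absurd hc hheadRne
          | cons z zs => rw [hc] at hb; simp at hb; simp [← hb]
        subst ha'; subst hb'
        exact h
      · exact (pvRuns_mem r x (List.tail_subset _ h'')).2
  case h3 =>
    rw [List.isChain_append]
    refine ⟨?_, ?_, ?_⟩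
    · have := pvRuns_chain l
      rw [← hLsplit, List.isChain_append] at this
      exact this.1
    · rw [List.isChain_cons]
      constructor
      · intro y hy
        have := pvRuns_chain r
        rw [← hRsplit, List.isChain_cons] at this
        have hbrk := this.1 y hy
        unfold pvBrk at hbrk ⊢
        rwa [pvGetLastI_append _ _ hheadRne]
      · have := pvRuns_chain r
        rw [← hRsplit, List.isChain_cons] at this
        exact this.2
    · intro x hx y hy
      simp only [List.head?_cons, Option.mem_def, Option.some_inj] at hy
      subst hy
      have := pvRuns_chain l
      rw [← hLsplit, List.isChain_append] at this
      have hbrk := this.2.2 x hx (pvRuns l).getLastI (by simp)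
      unfold pvBrk at hbrk ⊢
      rwa [pvHeadI_append _ _ hlastLne]
  rw [List.flatten_append, List.flatten_cons] at key
  have hfl : (pvRuns l).dropLast.flatten ++ ((pvRuns l).getLastI ++ (pvRuns r).headI)
      ++ (pvRuns r).tail.flatten = l ++ r := by
    have hfl1 : (pvRuns l).dropLast.flatten ++ (pvRuns l).getLastI = l := by
      conv_rhs => rw [← pvRuns_flatten l, ← hLsplit]
      simp [List.flatten_append]
    have hfl2 : (pvRuns r).headI ++ (pvRuns r).tail.flatten = r := by
      conv_rhs => rw [← pvRuns_flatten r, ← hRsplit]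
      simp
    conv_rhs => rw [← hfl1, ← hfl2]
    simp [List.append_assoc]
  rw [← List.append_assoc] at key
  rw [hfl] at key
  exact key

-- the fold over the merged run list = B's three-candidate selection
theorem pvCombine_best (L R : List (List Char)) (hL : L ≠ []) (hR : R ≠ [])
    (hhR : R.headI ≠ []) :
    (L.dropLast ++ (L.getLastI ++ R.headI) :: R.tail).foldl pvSel []
      = (if (R.foldl pvSel []).length >
            (if (L.getLastI ++ R.headI).length > (L.foldl pvSel []).length
             then L.getLastI ++ R.headI else L.foldl pvSel []).length
         then R.foldl pvSel []
         else (if (L.getLastI ++ R.headI).length > (L.foldl pvSel []).length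
               then L.getLastI ++ R.headI else L.foldl pvSel [])) := by
  obtain ⟨hR', tR, rfl⟩ : ∃ h t, R = h :: t := by
    cases R with
    | nil => exact absurd rfl hR
    | cons a b => exact ⟨a, b, rfl⟩
  simp only [List.headI] at hhR ⊢
  simp only [List.tail_cons]
  have hLsplit := pvDropLast_append_getLastI L hL
  have hlb : L.foldl pvSel [] = pvSel (L.dropLast.foldl pvSel []) L.getLastI := by
    conv_lhs => rw [← hLsplit]
    rw [List.foldl_append]
    rfl
  have hrb : (hR' :: tR).foldl pvSel ([] : List Char) = tR.foldl pvSel hR' := by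
    rw [List.foldl_cons]
    congr 1
    unfold pvSel
    rw [if_pos (by simpa using List.length_pos_iff.mpr hhR)]
  rw [List.foldl_append]
  rw [pvFoldl_sel_cons tR (L.dropLast.foldl pvSel []) (L.getLastI ++ hR')]
  rw [pvFoldl_sel_ge tR (L.getLastI ++ hR') hR' (by simp)]
  rw [hlb, hrb]
  have hC : L.getLastI.length < (L.getLastI ++ hR').length := by
    have := List.length_pos_iff.mpr hhR
    simp only [List.length_append]
    omega
  have hD := pvFoldl_sel_length tR hR'
  have hA := pvFoldl_sel_length tR (L.getLastI ++ hR')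
  unfold pvSel
  split_ifs <;> first | rfl | (exfalso; omega)

theorem pvFoldl_sel_start (R : List (List Char)) (hR : R ≠ []) (hhR : R.headI ≠ [])
    (a : List Char) :
    R.foldl pvSel a = if (R.foldl pvSel []).length > a.length then R.foldl pvSel [] else a := by
  obtain ⟨h, tl, rfl⟩ : ∃ h t, R = h :: t := by
    cases R with
    | nil => exact absurd rfl hR
    | cons x y => exact ⟨x, y, rfl⟩
  simp only [List.headI] at hhR
  have hrb : (h :: tl).foldl pvSel ([] : List Char) = tl.foldl pvSel h := by
    rw [List.foldl_cons]
    congr 1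
    unfold pvSel
    rw [if_pos (by simpa using List.length_pos_iff.mpr hhR)]
  rw [hrb, pvFoldl_sel_cons]

-- B's divide and conquer computes (best over runs, first run, last run)
theorem pvSolveB_spec : ∀ (n : Nat) (t : List Char), t.length ≤ n → t ≠ [] →
    pvSolveB t = ((pvRuns t).foldl pvSel [], (pvRuns t).headI, (pvRuns t).getLastI) := by
  intro n
  induction n with
  | zero =>
    intro t h ht
    exact absurd (List.eq_nil_of_length_eq_zero (by omega)) ht
  | succ n ih =>
    intro t hlen ht
    by_cases h1 : t.length = 1
    · obtain ⟨c, rfl⟩ := List.length_eq_one_iff.mp h1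
      rw [pvSolveB]
      simp [pvRuns, pvRun1, pvSel, List.getLastI]
    · have h0 : t.length ≠ 0 := by simpa [List.length_eq_zero_iff] using ht
      have hlen2 : 2 ≤ t.length := by omega
      rw [pvSolveB, dif_neg h1, dif_neg ht]
      have hm : PySem.Int.floordiv ((t.length : Nat) : Int) 2 = ((t.length / 2 : Nat) : Int) := by
        exact_mod_cast PySem.Int.floordiv_natCast t.length 2
      simp only [hm, PySem.List.slice_to_natCast, PySem.List.slice_from_natCast]
      have hllen : (t.take (t.length / 2)).length = t.length / 2 := by
        simp [List.length_take]; omega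
      have hrlen : (t.drop (t.length / 2)).length = t.length - t.length / 2 := by
        simp [List.length_drop]
      have hlne : t.take (t.length / 2) ≠ [] := by
        apply List.ne_nil_of_length_pos; omega
      have hrne : t.drop (t.length / 2) ≠ [] := by
        apply List.ne_nil_of_length_pos; omega
      have ihl := ih (t.take (t.length / 2)) (by omega) hlne
      have ihr := ih (t.drop (t.length / 2)) (by omega) hrne
      rw [ihl, ihr]
      have hlr : t.take (t.length / 2) ++ t.drop (t.length / 2) = t :=
        List.take_append_drop _ t
      -- name the two halves and their run lists
      set l := t.take (t.length / 2) with hldef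
      set r := t.drop (t.length / 2) with hrdef
      have hLne := pvRuns_ne_nil l hlne
      have hRne := pvRuns_ne_nil r hrne
      have hheadR : (pvRuns r).headI ∈ pvRuns r := by
        rw [← pvHeadI_cons_tail (pvRuns r) hRne]; exact List.mem_cons_self
      have hheadRne : (pvRuns r).headI ≠ [] := (pvRuns_mem r _ hheadR).1
      have hgl : PySem.List.pyGetD l (-1) ' ' = l.getLastI := by
        rw [PySem.List.pyGetD_neg_one l ' ' hlne, pvGetLastI_eq_getLast l hlne]
      have hgr : PySem.List.pyGetD r 0 ' ' = r.headI := by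
        obtain ⟨a, as, hras⟩ := List.exists_cons_of_ne_nil hrne
        rw [hras, PySem.List.pyGetD_zero_cons]; rfl
      simp only [hgl, hgr]
      conv_rhs => rw [← hlr]
      by_cases hj : l.getLastI ≤ r.headI
      · rw [pvRuns_append_join l r hlne hrne hj]
        refine Prod.ext ?_ (Prod.ext ?_ ?_)
        · -- best
          simp only [if_pos hj]
          exact (pvCombine_best (pvRuns l) (pvRuns r) hLne hRne hheadRne).symm
        · -- pre
          simp only [hj, and_true]
          cases hL : pvRuns l with
          | nil => exact absurd hL hLne
          | cons x L' =>
            cases L' with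
            | nil =>
              have hxl : x = l := by
                have := pvRuns_flatten l
                rw [hL] at this
                simpa using this
              subst hxl
              simp [List.getLastI]
            | cons y L'' =>
              have hymem : y ∈ pvRuns l := by rw [hL]; simp
              have hyne : y ≠ [] := (pvRuns_mem l _ hymem).1
              have hflat := pvRuns_flatten l
              rw [hL] at hflat
              have hxlt : x.length < l.length := by
                have hylen := List.length_pos_iff.mpr hyne
                have : x.length + y.length ≤ l.length := by
                  rw [← hflat]
                  simp only [List.flatten_cons, List.length_append]
                  omega
                omega
              simp only [List.headI]
              rw [if_neg (by omega)]
              rfl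
        · -- suf
          simp only [hj, and_true]
          cases hR : pvRuns r with
          | nil => exact absurd hR hRne
          | cons x R' =>
            cases R' with
            | nil =>
              have hxr : x = r := by
                have := pvRuns_flatten r
                rw [hR] at this
                simpa using this
              subst hxr
              simp only [List.getLastI, List.headI, List.tail_cons]
              rw [if_pos trivial,
                pvGetLastI_append _ _ (by simp : [(pvRuns l).getLastI ++ r] ≠ [])]
              simp [List.getLastI]
            | cons y R'' =>
              have hflat := pvRuns_flatten r
              rw [hR] at hflat
              have hxne : x ≠ [] := (pvRuns_mem r x (by rw [hR]; simp)).1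
              have hglast : (x :: y :: R'').getLastI = (y :: R'').getLastI :=
                pvGetLastI_cons x _ (by simp)
              have hlastmem : (y :: R'').getLastI ∈ (y :: R'') := pvGetLastI_mem _ (by simp)
              have hlast_lt : (x :: y :: R'').getLastI.length < r.length := by
                rw [hglast]
                have h1' := pvLe_length_flatten (y :: R'') _ hlastmem
                have hxlen := List.length_pos_iff.mpr hxne
                rw [← hflat]
                simp only [List.flatten_cons, List.length_append] at h1' ⊢
                omega
              rw [if_neg (by omega)]
              simp only [List.headI, List.tail_cons]
              rw [pvGetLastI_append _ _ (by simp : ((pvRuns l).getLastI ++ x) :: y :: R'' ≠ []),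
                pvGetLastI_cons ((pvRuns l).getLastI ++ x) (y :: R'') (by simp)]
              exact hglast
      · rw [pvRuns_append_sep l r hlne hrne hj]
        refine Prod.ext ?_ (Prod.ext ?_ ?_)
        · -- best
          simp only [if_neg hj, List.length_nil]
          rw [show (if 0 > (List.foldl pvSel [] (pvRuns l)).length then ([] : List Char)
                else List.foldl pvSel [] (pvRuns l)) = List.foldl pvSel [] (pvRuns l)
              from if_neg (by omega)]
          rw [List.foldl_append]
          exact (pvFoldl_sel_start (pvRuns r) hRne hheadRne _).symm
        · -- pre
          dsimp only
          rw [if_neg (fun hc => hj hc.2)]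
          exact (pvHeadI_append _ _ hLne).symm
        · -- suf
          dsimp only
          rw [if_neg (fun hc => hj hc.2)]
          exact (pvGetLastI_append _ _ hRne).symm

-- ===== VERDICT (by name: the statement is the Claim_ definition above) =====
theorem count_alph_spec : Claim_equal_count_alph := by
  intro s _
  unfold Spec_count_alph count_alph count_alph_alt
  match hcs : s.toList with
  | [] => simp
  | c :: rest =>
    have hb := pvBridgeA (c :: rest) (c :: rest).length 0 (by omega) [] []
    simp only [Nat.cast_zero, List.drop_zero] at hb
    dsimp only
    rw [hb, pvLoopA_runs (c :: rest).length _ le_rfl]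
    rw [if_pos (by simp : (c :: rest) ≠ [])]
    rw [pvSolveB_spec (c :: rest).length (c :: rest) le_rfl (by simp)]
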